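-- pv_equiv track=rewrite | github.com/denizariyan/dedup | benchmark/runner.py | strip_time_output
-- ===== SOURCE A (Python) =====
-- def strip_time_output(stderr: str) -> str:
--     """Remove /usr/bin/time output from stderr."""
--     lines = stderr.split("\n")
--     result = []
--     for line in lines:
--         if "Command being timed:" in line:
--             break
--         result.append(line)
--     return "\n".join(result)
-- ===== SOURCE B (Python) =====
-- def strip_time_output(stderr: str) -> str:
--     """Remove /usr/bin/time output from stderr."""
--     pos = stderr.find("Command being timed:")
--     if pos == -1:
--         return stderr
--     start = stderr.rfind("\n", 0, pos) + 1
--     return stderr[:start - 1] if start > 0 else ""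
-- ===== Notes on version B (the rewrite author's own statement) =====
-- stated objective: alternative
-- what changed: Instead of splitting stderr into a list of lines, scanning them with a break and re-joining, B locates the marker with str.find, finds the preceding newline with str.rfind and returns a single slice of the raw string.
import Mathlib
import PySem

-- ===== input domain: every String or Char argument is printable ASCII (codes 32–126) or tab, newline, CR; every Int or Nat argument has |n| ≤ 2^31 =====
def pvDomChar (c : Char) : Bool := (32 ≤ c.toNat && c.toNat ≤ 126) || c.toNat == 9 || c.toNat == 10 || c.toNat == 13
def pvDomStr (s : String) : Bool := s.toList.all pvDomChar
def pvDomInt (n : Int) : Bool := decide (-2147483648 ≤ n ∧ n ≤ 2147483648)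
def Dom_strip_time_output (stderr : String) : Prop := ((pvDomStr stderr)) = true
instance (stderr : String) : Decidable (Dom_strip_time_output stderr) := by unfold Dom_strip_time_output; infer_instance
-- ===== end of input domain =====

-- B replaces A's split-into-lines / loop-with-break / re-join by a direct find of the
-- marker and a single slice of the raw string (alternative decomposition, same cost).

-- ===== PORT A =====
-- the marker literal, as a list of chars
def pvMarker : List Char := "Command being timed:".toList

-- 'for line in lines: if marker in line: break; result.append(line)'
def stripA_loop : List (List Char) → List (List Char)
  | [] => []
  | l :: rest =>
    if PySem.Chars.isIn pvMarker l then [] else l :: stripA_loop rest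

def strip_time_output (stderr : String) : String :=
  String.ofList (PySem.Chars.join ['\n']
    (stripA_loop (PySem.Chars.splitOn stderr.toList ['\n'])))

-- ===== PORT B =====
def strip_time_output_alt (stderr : String) : String :=
  let pos := PySem.Chars.find stderr.toList pvMarker
  if pos = -1 then stderr
  else
    let start := PySem.Chars.rfindFrom stderr.toList ['\n'] 0 (some pos) + 1
    if 0 < start then
      String.ofList (PySem.Chars.slice stderr.toList none (some (start - 1)))
    else ""

-- ===== PRECONDITION & SPEC =====
def Spec_strip_time_output (stderr : String) (out : String) : Prop := out = strip_time_output_alt stderr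
instance (stderr : String) (out : String) : Decidable (Spec_strip_time_output stderr out) := by unfold Spec_strip_time_output; infer_instance

-- ===== CLAIM (what is proved, stated in full; the proofs are below) =====
def Claim_equal_strip_time_output : Prop := ∀ (stderr : String), Dom_strip_time_output stderr → Spec_strip_time_output stderr (strip_time_output stderr)

-- ===== LEMMAS AND PROOFS =====

-- reference single-char split on '\n', structural
def refSplit : List Char → List (List Char)
  | [] => [[]]
  | c :: rest => if c = '\n' then [] :: refSplit rest else (refSplit rest).modifyHead (c :: ·)

theorem refSplit_ne_nil (cs : List Char) : refSplit cs ≠ [] := by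
  cases cs with
  | nil => simp [refSplit]
  | cons c rest =>
    simp only [refSplit]
    split_ifs
    · simp
    · cases h : refSplit rest with
      | nil => exact absurd h (refSplit_ne_nil rest)
      | cons a l => simp

theorem modifyHead_nil_append (l : List (List Char)) : l.modifyHead (fun x => [] ++ x) = l := by
  cases l <;> simp

theorem splitOn_go_eq (fuel : ℕ) : ∀ (l cur : List Char) (acc : List (List Char)), l.length ≤ fuel →
    PySem.Chars.splitOn.go ['\n'] fuel l cur acc
      = acc.reverse ++ (refSplit l).modifyHead (fun x => cur.reverse ++ x) := by
  induction fuel with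
  | zero =>
    intro l cur acc hl
    have hl0 : l = [] := List.length_eq_zero_iff.mp (Nat.le_zero.mp hl)
    subst hl0
    rw [PySem.Chars.splitOn.go.eq_def]
    simp [refSplit]
  | succ fuel ih =>
    intro l cur acc hl
    cases l with
    | nil =>
      rw [PySem.Chars.splitOn.go.eq_def]
      simp [refSplit]
    | cons c rest =>
      rw [PySem.Chars.splitOn.go.eq_def]
      simp only []
      have hpre : (['\n'].isPrefixOf (c :: rest)) = (c == '\n') := by
        simp [List.isPrefixOf, eq_comm]
      by_cases hc : c = '\n'
      · subst hc
        simp only [hpre, BEq.rfl, if_pos]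
        have : List.drop (['\n'] : List Char).length ('\n' :: rest) = rest := by simp
        rw [this, ih rest [] (cur.reverse :: acc) (by simpa using Nat.le_of_succ_le_succ hl)]
        cases h : refSplit rest with
        | nil => exact absurd h (refSplit_ne_nil rest)
        | cons a l' => simp [refSplit, h]
      · have : (c == '\n') = false := by simp [hc]
        simp only [hpre, this, Bool.false_eq_true, reduceIte]
        rw [ih rest (c :: cur) acc (by simpa using Nat.le_of_succ_le_succ hl)]
        have hne := refSplit_ne_nil rest
        cases h : refSplit rest with
        | nil => exact absurd h hne
        | cons a l' => simp [refSplit, hc, h]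

theorem splitOn_eq_refSplit (cs : List Char) : PySem.Chars.splitOn cs ['\n'] = refSplit cs := by
  unfold PySem.Chars.splitOn
  rw [splitOn_go_eq (cs.length + 1) cs [] [] (Nat.le_succ _)]
  simpa using modifyHead_nil_append (refSplit cs)

theorem refSplit_no_nl {cs : List Char} (h : '\n' ∉ cs) : refSplit cs = [cs] := by
  induction cs with
  | nil => simp [refSplit]
  | cons c rest ih =>
    have hc : ¬ c = '\n' := fun hc => h (hc ▸ List.mem_cons_self)
    have hr : '\n' ∉ rest := fun hm => h (List.mem_cons_of_mem _ hm)
    simp [refSplit, hc, ih hr]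

theorem refSplit_append {L : List Char} (Y : List Char) (h : '\n' ∉ L) :
    refSplit (L ++ '\n' :: Y) = L :: refSplit Y := by
  induction L with
  | nil => simp [refSplit]
  | cons c rest ih =>
    have hc : ¬ c = '\n' := fun hc => h (hc ▸ List.mem_cons_self)
    have hr : '\n' ∉ rest := fun hm => h (List.mem_cons_of_mem _ hm)
    simp [refSplit, hc, ih hr]

-- a '\n'-free pattern that is a prefix of X ++ '\n' :: Y is a prefix of X
theorem prefix_of_append_nl {M X Y : List Char} (hM : '\n' ∉ M)
    (h : M <+: X ++ '\n' :: Y) : M <+: X := by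
  by_cases hle : M.length ≤ X.length
  · have heq := List.prefix_iff_eq_take.mp h
    rw [List.take_append_of_le_length hle] at heq
    exact heq ▸ List.take_prefix _ _
  · exfalso
    obtain ⟨t, ht⟩ := h
    have hX : X.length < (M ++ t).length := by
      rw [ht]; simp
    have h1 : (M ++ t)[X.length]'hX = '\n' := by
      have h2 : (X ++ '\n' :: Y)[X.length]'(by simp) = '\n' := by
        rw [List.getElem_append_right (Nat.le_refl _)]
        simp
      simp only [ht, h2]
    have h3 : (M ++ t)[X.length]'hX = M[X.length]'(by omega) :=
      List.getElem_append_left (by omega)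
    exact hM (h1 ▸ h3 ▸ List.getElem_mem _)

-- ---- rfind (single char '\n') ----
theorem rgo_zero (s sub : List Char) :
    PySem.Chars.rfind.go s sub 0 = if sub.isPrefixOf s then 0 else -1 := rfl

theorem rgo_succ (s sub : List Char) (j : ℕ) :
    PySem.Chars.rfind.go s sub (j + 1)
      = if sub.isPrefixOf (s.drop (j + 1)) then ((j : ℤ) + 1) else PySem.Chars.rfind.go s sub j := by
  rw [PySem.Chars.rfind.go.eq_def]
  norm_num

theorem rgo_hit {s : List Char} {n : ℕ} (h : List.isPrefixOf ['\n'] (s.drop n) = true) :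
    PySem.Chars.rfind.go s ['\n'] n = n := by
  cases n with
  | zero =>
    rw [rgo_zero]
    simp only [List.drop_zero] at h
    simp [h]
  | succ j =>
    rw [rgo_succ]
    simp [h]

theorem neg_one_le_rgo (s : List Char) (n : ℕ) : -1 ≤ PySem.Chars.rfind.go s ['\n'] n := by
  induction n with
  | zero => rw [rgo_zero]; split_ifs <;> omega
  | succ j ih =>
    rw [rgo_succ]
    split_ifs
    · omega
    · exact ih

theorem rgo_none {s : List Char} (h : '\n' ∉ s) (n : ℕ) : PySem.Chars.rfind.go s ['\n'] n = -1 := by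
  induction n with
  | zero =>
    rw [rgo_zero]
    have : ¬ (['\n'].isPrefixOf s = true) := by
      intro hp
      exact h ((List.isPrefixOf_iff_prefix.mp hp).subset List.mem_cons_self)
    simp [this]
  | succ j ih =>
    rw [rgo_succ]
    have : ¬ (['\n'].isPrefixOf (s.drop (j + 1)) = true) := by
      intro hp
      exact h (List.mem_of_mem_drop ((List.isPrefixOf_iff_prefix.mp hp).subset List.mem_cons_self))
    simp [this, ih]

theorem rgo_append (L Y : List Char) (n : ℕ) :
    PySem.Chars.rfind.go (L ++ '\n' :: Y) ['\n'] (L.length + 1 + n)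
      = if PySem.Chars.rfind.go Y ['\n'] n = -1 then (L.length : ℤ)
        else (L.length : ℤ) + 1 + PySem.Chars.rfind.go Y ['\n'] n := by
  induction n with
  | zero =>
    have hd : (L ++ '\n' :: Y).drop (L.length + 1) = Y := by
      rw [List.drop_append]
      simp
    rw [show L.length + 1 + 0 = L.length + 1 from rfl, rgo_succ, hd, rgo_zero]
    by_cases hp : ['\n'].isPrefixOf Y = true
    · simp [hp]
    · have hhit : List.isPrefixOf ['\n'] ((L ++ '\n' :: Y).drop L.length) = true := by
        rw [List.drop_append]
        simp [List.isPrefixOf]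
      simp [hp, rgo_hit hhit]
  | succ n ih =>
    have hd : (L ++ '\n' :: Y).drop (L.length + 1 + n + 1) = Y.drop (n + 1) := by
      rw [List.drop_append]
      have h1 : L.length + 1 + n + 1 - L.length = n + 2 := by omega
      rw [h1]
      simp
      omega
    rw [show L.length + 1 + (n + 1) = (L.length + 1 + n) + 1 from by omega, rgo_succ, hd,
      rgo_succ]
    by_cases hp : ['\n'].isPrefixOf (Y.drop (n + 1)) = true
    · have hne : ((n : ℤ) + 1) ≠ -1 := by omega
      simp only [hp, if_pos, reduceIte, hne]
      push_cast
      ring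
    · simp only [hp, Bool.false_eq_true, reduceIte]
      exact ih

theorem rfind_no_nl {X : List Char} (h : '\n' ∉ X) : PySem.Chars.rfind X ['\n'] = -1 := by
  exact rgo_none h X.length

theorem neg_one_le_rfind (X : List Char) : -1 ≤ PySem.Chars.rfind X ['\n'] := by
  exact neg_one_le_rgo X X.length

theorem rfind_append_nl (L Y : List Char) :
    PySem.Chars.rfind (L ++ '\n' :: Y) ['\n']
      = if PySem.Chars.rfind Y ['\n'] = -1 then (L.length : ℤ)
        else (L.length : ℤ) + 1 + PySem.Chars.rfind Y ['\n'] := by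
  unfold PySem.Chars.rfind
  have hlen : (L ++ '\n' :: Y).length = L.length + 1 + Y.length := by simp; omega
  rw [hlen]
  exact rgo_append L Y Y.length

-- first-newline decomposition
theorem exists_first_nl {cs : List Char} (h : '\n' ∈ cs) :
    ∃ L Y, cs = L ++ '\n' :: Y ∧ '\n' ∉ L := by
  induction cs with
  | nil => simp at h
  | cons c rest ih =>
    by_cases hc : c = '\n'
    · exact ⟨[], rest, by simp [hc], by simp⟩
    · have hm : '\n' ∈ rest := by
        rcases List.mem_cons.mp h with h1 | h1
        · exact absurd h1.symm hc
        · exact h1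
      obtain ⟨L, Y, heq, hL⟩ := ih hm
      exact ⟨c :: L, Y, by simp [heq], by simp [hL]; exact fun he => hc he.symm⟩

theorem rfind_mem {X : List Char} (h : '\n' ∈ X) : PySem.Chars.rfind X ['\n'] ≠ -1 := by
  obtain ⟨L, Y, rfl, -⟩ := exists_first_nl h
  rw [rfind_append_nl]
  have := neg_one_le_rfind Y
  split_ifs <;> omega

theorem rfindFrom_eq_rfind_take (s : List Char) (j : ℤ) (h0 : 0 ≤ j) (h1 : j ≤ s.length) :
    PySem.Chars.rfindFrom s ['\n'] 0 (some j) = PySem.Chars.rfind (s.take j.toNat) ['\n'] := by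
  unfold PySem.Chars.rfindFrom
  have h2 : ¬ ((s.length : ℤ) < j) := by omega
  have h3 : ¬ (j < 0) := by omega
  simp only [h2, h3, reduceIte]
  norm_num
  have := neg_one_le_rfind (s.take j.toNat)
  split_ifs with h7 <;> omega

-- ---- find ----
theorem find_unique {s M : List Char} {j : ℤ} (h0 : 0 ≤ j)
    (hp : M <+: s.drop j.toNat) (hmin : ∀ i < j.toNat, ¬ M <+: s.drop i) :
    PySem.Chars.find s M = j := by
  have hinf : PySem.Chars.isIn M s = true :=
    (PySem.Chars.exists_prefix_drop_iff_isIn M s).mp ⟨j.toNat, hp⟩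
  have hnn : 0 ≤ PySem.Chars.find s M :=
    (PySem.Chars.find_nonneg_iff s M).mpr ((PySem.Chars.isIn_iff_infix M s).mp hinf)
  obtain ⟨hfp, hfmin⟩ := PySem.Chars.find_spec hnn
  rcases Nat.lt_trichotomy (PySem.Chars.find s M).toNat j.toNat with h | h | h
  · exact absurd hfp (hmin _ h)
  · omega
  · exact absurd hp (hfmin _ h)

theorem not_infix_append_nl {M L Y : List Char} (hM : '\n' ∉ M)
    (hL : ¬ M <:+: L) (hY : ¬ M <:+: Y) : ¬ M <:+: (L ++ '\n' :: Y) := by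
  intro hinf
  obtain ⟨j, hj⟩ := (PySem.Chars.exists_prefix_drop_iff_isIn M _).mpr
    ((PySem.Chars.isIn_iff_infix M _).mpr hinf)
  by_cases hle : j ≤ L.length
  · have hd : (L ++ '\n' :: Y).drop j = L.drop j ++ '\n' :: Y :=
      List.drop_append_of_le_length hle
    rw [hd] at hj
    exact hL ((prefix_of_append_nl hM hj).isInfix.trans (List.drop_suffix j L).isInfix)
  · have hd : (L ++ '\n' :: Y).drop j = Y.drop (j - L.length - 1) := by
      rw [List.drop_append]
      have h1 : L.drop j = [] := List.drop_eq_nil_of_le (by omega)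
      have h2 : j - L.length = (j - L.length - 1) + 1 := by omega
      rw [h1, h2]
      simp
    rw [hd] at hj
    exact hY (hj.isInfix.trans (List.drop_suffix _ Y).isInfix)

theorem find_append_nl {M L Y : List Char} (hM : '\n' ∉ M) (hL : ¬ M <:+: L) (hY : M <:+: Y) :
    PySem.Chars.find (L ++ '\n' :: Y) M = (L.length : ℤ) + 1 + PySem.Chars.find Y M := by
  have hnn : 0 ≤ PySem.Chars.find Y M := (PySem.Chars.find_nonneg_iff Y M).mpr hY
  obtain ⟨hfp, hfmin⟩ := PySem.Chars.find_spec hnn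
  set j' : ℕ := (PySem.Chars.find Y M).toNat with hj'
  have hjval : PySem.Chars.find Y M = (j' : ℤ) := by omega
  apply find_unique (j := (L.length : ℤ) + 1 + (j' : ℤ)) (by omega) ?_ ?_ |>.trans (by omega)
  · have ht : ((L.length : ℤ) + 1 + (j' : ℤ)).toNat = L.length + 1 + j' := by omega
    rw [ht]
    have hd : (L ++ '\n' :: Y).drop (L.length + 1 + j') = Y.drop j' := by
      rw [List.drop_append]
      have h1 : L.drop (L.length + 1 + j') = [] := List.drop_eq_nil_of_le (by omega)
      have h2 : L.length + 1 + j' - L.length = j' + 1 := by omega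
      rw [h1, h2]
      simp
    rw [hd]
    exact hfp
  · have ht : ((L.length : ℤ) + 1 + (j' : ℤ)).toNat = L.length + 1 + j' := by omega
    rw [ht]
    intro i hi hpre
    by_cases hle : i ≤ L.length
    · have hd : (L ++ '\n' :: Y).drop i = L.drop i ++ '\n' :: Y :=
        List.drop_append_of_le_length hle
      rw [hd] at hpre
      exact hL ((prefix_of_append_nl hM hpre).isInfix.trans (List.drop_suffix i L).isInfix)
    · have hd : (L ++ '\n' :: Y).drop i = Y.drop (i - L.length - 1) := by
        rw [List.drop_append]
        have h1 : L.drop i = [] := List.drop_eq_nil_of_le (by omega)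
        have h2 : i - L.length = (i - L.length - 1) + 1 := by omega
        rw [h1, h2]
        simp
      rw [hd] at hpre
      exact hfmin _ (by omega) hpre

-- the loop returns [] iff the marker occurs in the FIRST line of cs
theorem loop_nil_iff (cs : List Char) :
    stripA_loop (refSplit cs) = [] ↔
      (0 ≤ PySem.Chars.find cs pvMarker ∧
       PySem.Chars.rfind (cs.take (PySem.Chars.find cs pvMarker).toNat) ['\n'] = -1) := by
  have hM : '\n' ∉ pvMarker := by decide
  have hMlen : 1 ≤ pvMarker.length := by decide
  by_cases hnl : '\n' ∈ cs
  · obtain ⟨L, Y, rfl, hL⟩ := exists_first_nl hnl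
    rw [refSplit_append Y hL]
    have hstep : (stripA_loop (L :: refSplit Y) = []) ↔ PySem.Chars.isIn pvMarker L = true := by
      simp only [stripA_loop]
      split_ifs with h <;> simp [h]
    rw [hstep]
    constructor
    · intro hin
      obtain ⟨j₀, hj₀⟩ := (PySem.Chars.exists_prefix_drop_iff_isIn pvMarker L).mpr hin
      have hj₀len : j₀ < L.length := by
        have := hj₀.length_le
        rw [List.length_drop] at this
        omega
      have hpre : pvMarker <+: (L ++ '\n' :: Y).drop j₀ := by
        rw [List.drop_append_of_le_length (by omega)]
        exact hj₀.trans (List.prefix_append _ _)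
      have hinf : pvMarker <:+: (L ++ '\n' :: Y) :=
        hpre.isInfix.trans (List.drop_suffix _ _).isInfix
      have hf0 : 0 ≤ PySem.Chars.find (L ++ '\n' :: Y) pvMarker :=
        (PySem.Chars.find_nonneg_iff _ _).mpr hinf
      obtain ⟨hfp, hfmin⟩ := PySem.Chars.find_spec hf0
      have hle : (PySem.Chars.find (L ++ '\n' :: Y) pvMarker).toNat ≤ j₀ := by
        by_contra hlt
        exact hfmin j₀ (by omega) hpre
      refine ⟨hf0, ?_⟩
      rw [List.take_append_of_le_length (by omega)]
      exact rfind_no_nl (fun hm => hL (List.mem_of_mem_take hm))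
    · rintro ⟨hf0, hr⟩
      set jn := (PySem.Chars.find (L ++ '\n' :: Y) pvMarker).toNat with hjn
      have hnotin : '\n' ∉ (L ++ '\n' :: Y).take jn := fun hm => rfind_mem hm hr
      have hjle : jn ≤ L.length := by
        by_contra hlt
        apply hnotin
        rw [List.take_append]
        refine List.mem_append_right _ ?_
        have h2 : jn - L.length = (jn - L.length - 1) + 1 := by omega
        rw [h2, List.take_succ_cons]
        exact List.mem_cons_self
      obtain ⟨hfp, -⟩ := PySem.Chars.find_spec hf0
      rw [List.drop_append_of_le_length hjle] at hfp
      have := prefix_of_append_nl hM hfp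
      exact (PySem.Chars.isIn_iff_infix _ _).mpr
        (this.isInfix.trans (List.drop_suffix _ _).isInfix)
  · rw [refSplit_no_nl hnl]
    have hstep : (stripA_loop [cs] = []) ↔ PySem.Chars.isIn pvMarker cs = true := by
      simp only [stripA_loop]
      split_ifs with h <;> simp [h]
    rw [hstep]
    constructor
    · intro hin
      refine ⟨(PySem.Chars.find_nonneg_iff _ _).mpr ((PySem.Chars.isIn_iff_infix _ _).mp hin), ?_⟩
      exact rfind_no_nl (fun hm => hnl (List.mem_of_mem_take hm))
    · rintro ⟨hf0, -⟩
      exact (PySem.Chars.isIn_iff_infix _ _).mpr ((PySem.Chars.find_nonneg_iff _ _).mp hf0)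

-- B's result, written over lists
def refB (cs : List Char) : List Char :=
  if PySem.Chars.find cs pvMarker = -1 then cs
  else if PySem.Chars.rfind (cs.take (PySem.Chars.find cs pvMarker).toNat) ['\n'] = -1 then []
  else cs.take (PySem.Chars.rfind (cs.take (PySem.Chars.find cs pvMarker).toNat) ['\n']).toNat

theorem case_loop_nil {cs : List Char} (h : stripA_loop (refSplit cs) = []) :
    PySem.Chars.join ['\n'] (stripA_loop (refSplit cs)) = refB cs := by
  obtain ⟨hf, hr⟩ := (loop_nil_iff cs).mp h
  rw [h, PySem.Chars.join_nil]
  unfold refB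
  rw [if_neg (by omega), if_pos hr]

theorem case_no_nl {cs : List Char} (hnl : '\n' ∉ cs)
    (h : stripA_loop (refSplit cs) ≠ []) :
    PySem.Chars.join ['\n'] (stripA_loop (refSplit cs)) = refB cs := by
  rw [refSplit_no_nl hnl] at h ⊢
  have hin : PySem.Chars.isIn pvMarker cs = false := by
    by_contra hc
    apply h
    simp only [stripA_loop]
    rw [if_pos (by simpa using hc)]
  have hf : PySem.Chars.find cs pvMarker = -1 :=
    (PySem.Chars.find_eq_neg_one_iff _ _).mpr
      (fun hinf => by simp [(PySem.Chars.isIn_iff_infix _ _).mpr hinf] at hin)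
  simp only [stripA_loop, hin, Bool.false_eq_true, reduceIte]
  rw [PySem.Chars.join_singleton]
  unfold refB
  rw [if_pos hf]

theorem main_aux : ∀ (n : ℕ) (cs : List Char), cs.length ≤ n →
    PySem.Chars.join ['\n'] (stripA_loop (refSplit cs)) = refB cs := by
  have hM : '\n' ∉ pvMarker := by decide
  intro n
  induction n with
  | zero =>
    intro cs hlen
    have : cs = [] := List.length_eq_zero_iff.mp (Nat.le_zero.mp hlen)
    subst this
    by_cases h0 : stripA_loop (refSplit ([] : List Char)) = []
    · exact case_loop_nil h0
    · exact case_no_nl (by simp) h0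
  | succ n ih =>
    intro cs hlen
    by_cases h0 : stripA_loop (refSplit cs) = []
    · exact case_loop_nil h0
    by_cases hnl : '\n' ∈ cs
    swap
    · exact case_no_nl hnl h0
    obtain ⟨L, Y, rfl, hL⟩ := exists_first_nl hnl
    have hYlen : Y.length ≤ n := by
      simp only [List.length_append, List.length_cons] at hlen
      omega
    rw [refSplit_append Y hL] at h0 ⊢
    have hinL : PySem.Chars.isIn pvMarker L = false := by
      by_contra hc
      apply h0
      simp only [stripA_loop]
      rw [if_pos (by simpa using hc)]
    have hLinf : ¬ pvMarker <:+: L :=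
      fun hinf => by simp [(PySem.Chars.isIn_iff_infix _ _).mpr hinf] at hinL
    simp only [stripA_loop, hinL, Bool.false_eq_true, reduceIte]
    by_cases hMY : pvMarker <:+: Y
    · have hfY : 0 ≤ PySem.Chars.find Y pvMarker := (PySem.Chars.find_nonneg_iff _ _).mpr hMY
      set j' : ℕ := (PySem.Chars.find Y pvMarker).toNat with hj'
      have hfind : PySem.Chars.find (L ++ '\n' :: Y) pvMarker
          = ((L.length + 1 + j' : ℕ) : ℤ) := by
        rw [find_append_nl hM hLinf hMY]
        omega
      have htake : (L ++ '\n' :: Y).take (L.length + 1 + j') = L ++ '\n' :: Y.take j' := by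
        rw [List.take_append, List.take_of_length_le (by omega)]
        have h2 : L.length + 1 + j' - L.length = j' + 1 := by omega
        rw [h2, List.take_succ_cons]
      have htoNat : (PySem.Chars.find (L ++ '\n' :: Y) pvMarker).toNat = L.length + 1 + j' := by
        rw [hfind]; omega
      by_cases hr' : PySem.Chars.rfind (Y.take j') ['\n'] = -1
      · have hinner : stripA_loop (refSplit Y) = [] :=
          (loop_nil_iff Y).mpr ⟨hfY, hr'⟩
        rw [hinner, PySem.Chars.join_singleton]
        unfold refB
        rw [if_neg (by omega), htoNat, htake, rfind_append_nl, if_pos hr',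
          if_neg (by omega)]
        have : ((L.length : ℤ)).toNat = L.length := by omega
        rw [this, List.take_left]
      · have hinner : stripA_loop (refSplit Y) ≠ [] :=
          fun h => hr' ((loop_nil_iff Y).mp h).2
        have hr'0 : 0 ≤ PySem.Chars.rfind (Y.take j') ['\n'] := by
          have := neg_one_le_rfind (Y.take j')
          omega
        cases hinn : stripA_loop (refSplit Y) with
        | nil => exact absurd hinn hinner
        | cons p ps =>
          rw [PySem.Chars.join_cons_cons]
          have hIH := ih Y hYlen
          rw [hinn] at hIH
          unfold refB at hIH ⊢
          rw [if_neg (by omega), htoNat, htake, rfind_append_nl, if_neg hr',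
            if_neg (by omega)] at ⊢
          rw [if_neg (by omega), if_neg hr'] at hIH
          have ht2 : ((L.length : ℤ) + 1 + PySem.Chars.rfind (Y.take j') ['\n']).toNat
              = L.length + 1 + (PySem.Chars.rfind (Y.take j') ['\n']).toNat := by omega
          rw [ht2, List.take_append, List.take_of_length_le (by omega)]
          have h2 : L.length + 1 + (PySem.Chars.rfind (Y.take j') ['\n']).toNat - L.length
              = (PySem.Chars.rfind (Y.take j') ['\n']).toNat + 1 := by omega
          rw [h2, List.take_succ_cons]
          simp only [List.append_assoc, List.singleton_append]
          rw [hIH]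
    · have hfY : PySem.Chars.find Y pvMarker = -1 := (PySem.Chars.find_eq_neg_one_iff _ _).mpr hMY
      have hfcs : PySem.Chars.find (L ++ '\n' :: Y) pvMarker = -1 :=
        (PySem.Chars.find_eq_neg_one_iff _ _).mpr (not_infix_append_nl hM hLinf hMY)
      have hinner : stripA_loop (refSplit Y) ≠ [] := by
        intro h
        have := ((loop_nil_iff Y).mp h).1
        omega
      cases hinn : stripA_loop (refSplit Y) with
      | nil => exact absurd hinn hinner
      | cons p ps =>
        rw [PySem.Chars.join_cons_cons]
        have hIH := ih Y hYlen
        rw [hinn] at hIH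
        unfold refB at hIH ⊢
        rw [if_pos hfcs]
        rw [if_pos hfY] at hIH
        rw [hIH]
        simp

theorem main_eq (cs : List Char) :
    PySem.Chars.join ['\n'] (stripA_loop (refSplit cs)) = refB cs :=
  main_aux cs.length cs le_rfl

theorem strip_time_output_spec : Claim_equal_strip_time_output := by
  intro stderr _
  unfold Spec_strip_time_output strip_time_output strip_time_output_alt
  rw [splitOn_eq_refSplit, main_eq]
  set cs := stderr.toList with hcs
  by_cases hf : PySem.Chars.find cs pvMarker = -1
  · unfold refB
    rw [if_pos hf, if_pos hf]
    apply String.toList_inj.mp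
    rw [String.toList_ofList]
  · have hf0 : 0 ≤ PySem.Chars.find cs pvMarker := by
      have := PySem.Chars.neg_one_le_find cs pvMarker
      omega
    have hfle : PySem.Chars.find cs pvMarker ≤ cs.length := PySem.Chars.find_le_length cs pvMarker
    rw [if_neg hf, rfindFrom_eq_rfind_take cs _ hf0 hfle]
    unfold refB
    rw [if_neg hf]
    by_cases hr : PySem.Chars.rfind (cs.take (PySem.Chars.find cs pvMarker).toNat) ['\n'] = -1
    · rw [if_pos hr, hr]
      norm_num
    · have hr0 : 0 ≤ PySem.Chars.rfind (cs.take (PySem.Chars.find cs pvMarker).toNat) ['\n'] := by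
        have := neg_one_le_rfind (cs.take (PySem.Chars.find cs pvMarker).toNat)
        omega
      rw [if_neg hr, if_pos (by omega)]
      rw [PySem.Chars.slice_eq_listSlice]
      have h1 : PySem.Chars.rfind (cs.take (PySem.Chars.find cs pvMarker).toNat) ['\n'] + 1 - 1
          = PySem.Chars.rfind (cs.take (PySem.Chars.find cs pvMarker).toNat) ['\n'] := by ring
      rw [h1, PySem.List.slice_to cs hr0]
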